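-- pv_equiv track=rewrite | github.com/keversmithd/VsCode | OTF EXTRACT/sources/import re.py | getfuncname
-- ===== SOURCE A (Python) =====
-- def getfuncname(prototype):
--     n = ""
--     o = False
--     c = False
--     for i in range(len(prototype)):
--         if(prototype[i] == '('):
--             c = True
--             break
--         else:
--             if(prototype[i] == ' '):
--                 o = True
--             elif(o == True):
--                 n += prototype[i]
--     return n
-- ===== SOURCE B (Python) =====
-- def getfuncname(prototype):
--     j = prototype.find('(')
--     head = prototype if j == -1 else prototype[:j]
--     i = head.find(' ')
--     if i == -1:
--         return ''
--     return ''.join(c for c in head[i+1:] if c != ' ')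
-- ===== Notes on version B (the rewrite author's own statement) =====
-- stated objective: simpler
-- what changed: Replaces the manual character loop with its o/c state flags by three whole-string operations: cut at the first opening parenthesis, find the first space, and filter the remaining spaces out of the tail.
import Mathlib
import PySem

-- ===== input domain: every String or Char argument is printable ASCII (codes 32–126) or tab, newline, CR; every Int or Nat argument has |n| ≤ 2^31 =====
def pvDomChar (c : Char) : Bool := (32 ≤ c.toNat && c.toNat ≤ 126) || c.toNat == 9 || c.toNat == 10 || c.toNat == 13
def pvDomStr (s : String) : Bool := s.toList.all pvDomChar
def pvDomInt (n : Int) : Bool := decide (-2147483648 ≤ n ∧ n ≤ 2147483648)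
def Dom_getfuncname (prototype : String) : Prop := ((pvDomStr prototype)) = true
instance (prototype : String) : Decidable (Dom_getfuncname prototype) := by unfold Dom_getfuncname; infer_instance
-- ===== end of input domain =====

-- B replaces A's manual character loop with its two flag variables by whole-string
-- find/slice/filter steps (objective: simpler; a timing run measured B faster by a constant factor).

-- ===== PORT A =====
-- A's for-loop over the characters: accumulator n, flag o (a space has been seen);
-- the break on '(' is the first arm returning n.
def getfuncnameGo (l : List Char) (n : List Char) (o : Bool) : List Char :=
  match l with
  | [] => n
  | ch :: t =>
    if ch = '(' then n
    else if ch = ' ' then getfuncnameGo t n true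
    else if o then getfuncnameGo t (n ++ [ch]) o
    else getfuncnameGo t n o

def getfuncname (prototype : String) : String :=
  String.ofList (getfuncnameGo prototype.toList [] false)

-- ===== PORT B =====
-- j = prototype.find('('); head = prototype if j == -1 else prototype[:j];
-- i = head.find(' '); '' if i == -1 else ''.join(c for c in head[i+1:] if c != ' ')
-- (the ''.join over the generator keeping the non-space characters is the List.filter).
def getfuncname_alt (prototype : String) : String :=
  let s := prototype.toList
  let j := PySem.Chars.find s ['(']
  let head := if j = -1 then s else PySem.List.slice s none (some j)
  let i := PySem.Chars.find head [' ']
  if i = -1 then ""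
  else String.ofList ((PySem.List.slice head (some (i + 1)) none).filter (fun c => c ≠ ' '))

-- ===== PRECONDITION & SPEC =====
def Spec_getfuncname (prototype : String) (out : String) : Prop := out = getfuncname_alt prototype
instance (prototype : String) (out : String) : Decidable (Spec_getfuncname prototype out) := by unfold Spec_getfuncname; infer_instance

-- ===== CLAIM (what is proved, stated in full; the proofs are below) =====
def Claim_equal_getfuncname : Prop := ∀ (prototype : String), Dom_getfuncname prototype → Spec_getfuncname prototype (getfuncname prototype)

-- ===== LEMMAS AND PROOFS =====

-- the head expression of B, as the proofs name it
def pvHead (s : List Char) : List Char :=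
  if PySem.Chars.find s ['('] = -1 then s
  else PySem.List.slice s none (some (PySem.Chars.find s ['(']))

theorem pv_alt_eq (p : String) :
    getfuncname_alt p =
      (if PySem.Chars.find (pvHead p.toList) [' '] = -1 then ""
       else String.ofList ((PySem.List.slice (pvHead p.toList)
              (some (PySem.Chars.find (pvHead p.toList) [' '] + 1)) none).filter
              (fun c => c ≠ ' '))) := rfl

theorem pv_singleton_prefix (c : Char) (xs : List Char) :
    [c] <+: xs ↔ xs.head? = some c := by
  cases xs with
  | nil => simp
  | cons x t => simp [List.cons_prefix_cons, eq_comm]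

theorem pv_head_dropWhile (l : List Char) (c : Char) (h : c ∈ l) :
    (l.dropWhile (· ≠ c)).head? = some c := by
  induction l with
  | nil => cases h
  | cons x t ih =>
    by_cases hx : x = c
    · subst hx; simp
    · simp only [List.mem_cons] at h
      have ht : c ∈ t := h.resolve_left (fun e => hx e.symm)
      have hb : (decide (x ≠ c)) = true := by simp [hx]
      rw [List.dropWhile_cons, if_pos hb]
      exact ih ht

theorem pv_drop_takeWhile_len (l : List Char) (p : Char → Bool) :
    l.drop (l.takeWhile p).length = l.dropWhile p := by
  have h := List.takeWhile_append_dropWhile (p := p) (l := l)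
  calc l.drop (l.takeWhile p).length
      = (l.takeWhile p ++ l.dropWhile p).drop (l.takeWhile p).length := by rw [h]
    _ = l.dropWhile p := List.drop_left

theorem pv_take_takeWhile_len (l : List Char) (p : Char → Bool) :
    l.take (l.takeWhile p).length = l.takeWhile p :=
  ((List.prefix_iff_eq_take).mp (List.takeWhile_prefix p)).symm

theorem pv_takeWhile_of_not_mem (l : List Char) (c : Char) (h : c ∉ l) :
    l.takeWhile (· ≠ c) = l := by
  induction l with
  | nil => rfl
  | cons x t ih =>
    simp only [List.mem_cons, not_or] at h
    have hb : (decide (x ≠ c)) = true := by simp [Ne.symm h.1]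
    rw [List.takeWhile_cons, if_pos hb, ih h.2]

-- find of a single character: the length of the ≠-c prefix, or -1 if absent
theorem pv_find_single (l : List Char) (c : Char) :
    PySem.Chars.find l [c] =
      if c ∈ l then (((l.takeWhile (· ≠ c)).length : Nat) : Int) else -1 := by
  by_cases h : c ∈ l
  · have hinf : [c] <:+: l := by
      obtain ⟨s, t, rfl⟩ := List.append_of_mem h
      exact ⟨s, t, by simp⟩
    have hne : PySem.Chars.find l [c] ≠ -1 := by
      rw [Ne, PySem.Chars.find_eq_neg_one_iff]
      exact not_not_intro hinf
    have hspec := PySem.Chars.findFrom_natCast_spec l [c] 0 (Nat.zero_le _)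
      (by rw [show ((0:Nat):Int) = 0 from rfl, PySem.Chars.findFrom_zero]; exact hne)
    rw [show ((0:Nat):Int) = 0 from rfl, PySem.Chars.findFrom_zero] at hspec
    obtain ⟨hge, hpre, hmin⟩ := hspec
    set f := PySem.Chars.find l [c] with hf
    have hlw : l[(l.takeWhile (· ≠ c)).length]? = some c := by
      rw [← List.head?_drop, pv_drop_takeWhile_len]
      exact pv_head_dropWhile l c h
    have hjlt : ∀ j, j < (l.takeWhile (· ≠ c)).length → l[j]? ≠ some c := by
      intro j hj heq
      have hjmem : c ∈ l.takeWhile (· ≠ c) := by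
        have hq : (l.takeWhile (· ≠ c))[j]? = some c := by
          rw [← List.getElem?_take_of_lt hj, pv_take_takeWhile_len] at heq
          exact heq
        exact List.mem_of_getElem? hq
      have := List.mem_takeWhile_imp hjmem
      simp at this
    have hft : l[f.toNat]? = some c := by
      rw [← List.head?_drop]
      exact (pv_singleton_prefix c _).mp hpre
    have h1 : ¬ (l.takeWhile (· ≠ c)).length < f.toNat := by
      intro hlt
      exact hmin _ (Nat.zero_le _) hlt
        ((pv_singleton_prefix c _).mpr (by rw [List.head?_drop]; exact hlw))
    have h2 : ¬ f.toNat < (l.takeWhile (· ≠ c)).length := fun hlt => hjlt f.toNat hlt hft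
    have hwf : f.toNat = (l.takeWhile (· ≠ c)).length := by omega
    rw [if_pos h, ← hwf, Int.toNat_of_nonneg hge]
  · rw [if_neg h, PySem.Chars.find_eq_neg_one_iff]
    intro hinf
    exact h (hinf.subset (List.mem_singleton_self c))

-- B's head is exactly the prefix of the input before the first '('
theorem pv_head_eq (s : List Char) : pvHead s = s.takeWhile (· ≠ '(') := by
  unfold pvHead
  rw [pv_find_single]
  by_cases h : '(' ∈ s
  · rw [if_pos h, if_neg (by omega), PySem.List.slice_to_natCast, pv_take_takeWhile_len]
  · rw [if_neg h, if_pos rfl, pv_takeWhile_of_not_mem s '(' h]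

-- A's loop once a space has been seen: keep every non-space char up to '('
theorem pv_goA_true (l : List Char) (n : List Char) :
    getfuncnameGo l n true = n ++ (l.takeWhile (· ≠ '(')).filter (fun c => c ≠ ' ') := by
  induction l generalizing n with
  | nil => simp [getfuncnameGo]
  | cons ch t ih =>
    by_cases hp : ch = '('
    · subst hp; simp [getfuncnameGo]
    · by_cases hs : ch = ' '
      · subst hs
        simp [getfuncnameGo, hp, ih]
      · simp [getfuncnameGo, hp, hs, ih]

-- A's loop before any space: drop chars up to the first space, then as above
theorem pv_goA_false (l : List Char) (n : List Char) :
    getfuncnameGo l n false =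
      n ++ (if ' ' ∈ l.takeWhile (· ≠ '(')
            then (((l.takeWhile (· ≠ '(')).dropWhile (· ≠ ' ')).tail).filter (fun c => c ≠ ' ')
            else []) := by
  induction l generalizing n with
  | nil => simp [getfuncnameGo]
  | cons ch t ih =>
    by_cases hp : ch = '('
    · subst hp; simp [getfuncnameGo]
    · by_cases hs : ch = ' '
      · subst hs
        rw [getfuncnameGo]
        simp only [hp, if_false, pv_goA_true]
        simp [hp]
      · rw [getfuncnameGo]
        simp only [hp, hs, if_false, ih]
        simp [hp, hs, Ne.symm hs]

-- ===== VERDICT (by name: the statement is the Claim_ definition above) =====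
theorem getfuncname_spec : Claim_equal_getfuncname := by
  intro p _
  show getfuncname p = getfuncname_alt p
  rw [pv_alt_eq, pv_head_eq, pv_find_single]
  unfold getfuncname
  rw [pv_goA_false, List.nil_append, apply_ite String.ofList]
  by_cases hs : ' ' ∈ p.toList.takeWhile (· ≠ '(')
  · rw [if_pos hs, if_pos hs, if_neg (by omega :
        ¬((((p.toList.takeWhile (· ≠ '(')).takeWhile (· ≠ ' ')).length : Int) = -1))]
    have hcast : (((p.toList.takeWhile (· ≠ '(')).takeWhile (· ≠ ' ')).length : Int) + 1
        = ((((p.toList.takeWhile (· ≠ '(')).takeWhile (· ≠ ' ')).length + 1 : Nat) : Int) := by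
      push_cast; ring
    rw [hcast, PySem.List.slice_from _ (Int.natCast_nonneg _), Int.toNat_natCast]
    have hsplit : List.drop
        ((((p.toList.takeWhile (· ≠ '(')).takeWhile (· ≠ ' ')).length) + 1)
        (p.toList.takeWhile (· ≠ '(')) =
        (List.drop (((p.toList.takeWhile (· ≠ '(')).takeWhile (· ≠ ' ')).length)
          (p.toList.takeWhile (· ≠ '('))).drop 1 := by
      rw [List.drop_drop]
    rw [hsplit, pv_drop_takeWhile_len, List.drop_one]
  · rw [if_neg hs, if_neg hs, if_pos rfl]
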